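-- pv_equiv track=rewrite | github.com/KyounghoonLim/KyounghoonLim | Algorithm/CodingTest/Programmers_skill_test/level_2_(22.05.27)_solved/p1.py | solution
-- ===== SOURCE A (Python) =====
-- def solution(prices):
--     answer = [0] * len(prices)
--
--     for i in range(len(prices)):
--         t = 0
--         for j in range(i+1, len(prices)):
--             t += 1
--             if prices[i] > prices[j]:
--                 break
--         answer[i] = t
--
--     return answer
-- ===== SOURCE B (Python) =====
-- def solution(prices):
--     n = len(prices)
--     answer = [0] * n
--     stack = []  # (index, price), prices non-increasing from bottom? non-decreasing toward top's... kept monotone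
--     for i, p in enumerate(prices):
--         while stack and stack[-1][1] > p:
--             j, _ = stack.pop()
--             answer[j] = i - j
--         stack.append((i, p))
--     for j, _ in stack:
--         answer[j] = n - 1 - j
--     return answer
-- ===== Notes on version B (the rewrite author's own statement) =====
-- stated objective: faster
-- what changed: Replaced the nested scan-forward-until-smaller loop by a single-pass monotonic stack that pops indices when a lower price arrives and records the span, filling the survivors at the end.
import Mathlib
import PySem

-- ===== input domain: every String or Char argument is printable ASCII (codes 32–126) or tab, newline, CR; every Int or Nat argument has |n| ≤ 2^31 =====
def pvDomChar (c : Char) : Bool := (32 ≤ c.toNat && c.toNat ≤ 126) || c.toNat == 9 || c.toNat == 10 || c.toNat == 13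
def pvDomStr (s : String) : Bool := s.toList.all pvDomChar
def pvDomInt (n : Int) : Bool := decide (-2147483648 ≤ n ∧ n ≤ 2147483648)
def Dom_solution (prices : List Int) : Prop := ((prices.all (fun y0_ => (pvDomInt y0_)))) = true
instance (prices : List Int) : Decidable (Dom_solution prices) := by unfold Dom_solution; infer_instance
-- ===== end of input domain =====

-- B replaces A's quadratic scan-until-smaller inner loop by a one-pass monotonic stack (asymptotically faster).

-- ===== PORT A =====
-- inner loop of A: t += 1 for each following price, breaking at the first strictly smaller one
def countA (x : Int) : List Int → Int
  | [] => 0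
  | y :: ys => if x > y then 1 else 1 + countA x ys

-- outer loop of A over i: answer[i] is the inner count on the suffix after position i
def solution (prices : List Int) : List Int :=
  match prices with
  | [] => []
  | x :: xs => countA x xs :: solution xs

-- ===== PORT B =====
-- the while loop: pop stacked (index, price) entries with price > p, recording answer[j] = i - j
def popLoop (p : Int) (i : Nat) : List (Nat × Int) → List Int → List (Nat × Int) × List Int
  | [], ans => ([], ans)
  | (j, pj) :: rest, ans =>
      if pj > p then popLoop p i rest (ans.set j ((i : Int) - (j : Int)))
      else ((j, pj) :: rest, ans)

-- the for loop over enumerate(prices): pop, then push the current (index, price)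
def mainB (i : Nat) (stack : List (Nat × Int)) (ans : List Int) : List Int → List (Nat × Int) × List Int
  | [] => (stack, ans)
  | p :: rest =>
      let r := popLoop p i stack ans
      mainB (i + 1) ((i, p) :: r.1) r.2 rest

def solution_alt (prices : List Int) : List Int :=
  let n := prices.length
  let st := mainB 0 [] (List.replicate n 0) prices
  st.1.foldl (fun a e => a.set e.1 ((n : Int) - 1 - (e.1 : Int))) st.2

-- ===== PRECONDITION & SPEC =====
def Spec_solution (prices : List Int) (out : List Int) : Prop := out = solution_alt prices
instance (prices : List Int) (out : List Int) : Decidable (Spec_solution prices out) := by unfold Spec_solution; infer_instance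

-- ===== CLAIM (what is proved, stated in full; the proofs are below) =====
def Claim_equal_solution : Prop := ∀ (prices : List Int), Dom_solution prices → Spec_solution prices (solution prices)

-- ===== LEMMAS AND PROOFS =====

lemma countA_of_forall_le (x : Int) (xs : List Int) (h : ∀ y ∈ xs, x ≤ y) :
    countA x xs = (xs.length : Int) := by
  induction xs with
  | nil => simp [countA]
  | cons y ys ih =>
      have hy := h y (by simp)
      simp only [countA, if_neg (by omega : ¬ x > y)]
      rw [ih (fun z hz => h z (by simp [hz]))]
      simp; omega

lemma countA_found (x : Int) (xs : List Int) (m : Nat) (hm : m < xs.length)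
    (hx : xs.getD m 0 < x) (hbefore : ∀ k, k < m → x ≤ xs.getD k 0) :
    countA x xs = (m : Int) + 1 := by
  induction xs generalizing m with
  | nil => simp at hm
  | cons y ys ih =>
      cases m with
      | zero =>
          simp only [List.getD_cons_zero] at hx
          simp [countA, hx]
      | succ m' =>
          have h0 := hbefore 0 (Nat.succ_pos _)
          simp only [List.getD_cons_zero] at h0
          simp only [List.getD_cons_succ] at hx
          have := ih m' (by simpa using hm) hx
            (fun k hk => by simpa using hbefore (k+1) (by omega))
          simp only [countA, if_neg (by omega : ¬ x > y), this]
          push_cast; ring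

lemma getD_drop (P : List Int) (a k : Nat) :
    (P.drop a).getD k 0 = P.getD (a + k) 0 := by
  simp [List.getD_eq_getElem?_getD, List.getElem?_drop]

lemma solution_length (P : List Int) : (solution P).length = P.length := by
  induction P with
  | nil => rfl
  | cons x xs ih => simp [solution, ih]

lemma solution_getD (P : List Int) (j : Nat) (hj : j < P.length) :
    (solution P).getD j 0 = countA (P.getD j 0) (P.drop (j + 1)) := by
  induction P generalizing j with
  | nil => simp at hj
  | cons x xs ih =>
      cases j with
      | zero => simp [solution]
      | succ j' =>
          simp only [solution, List.getD_cons_succ, List.drop_succ_cons]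
          exact ih j' (by simpa using hj)

-- the loop invariant for B's single pass
def StackInv (P : List Int) (i : Nat) (stack : List (Nat × Int)) (ans : List Int) : Prop :=
  i ≤ P.length ∧
  ans.length = P.length ∧
  (∀ e ∈ stack, e.1 < i ∧ e.2 = P.getD e.1 0) ∧
  stack.Pairwise (fun a b => b.1 < a.1 ∧ b.2 ≤ a.2) ∧
  (∀ j, j < i → (j ∈ stack.map Prod.fst ↔ ∀ k, j < k → k < i → P.getD j 0 ≤ P.getD k 0)) ∧
  (∀ j, j < i → j ∉ stack.map Prod.fst →
     ans.getD j 0 = countA (P.getD j 0) (P.drop (j + 1)))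

lemma getD_set_self (l : List Int) (a : Nat) (v : Int) (h : a < l.length) :
    (l.set a v).getD a 0 = v := by
  simp [List.getD_eq_getElem?_getD, h]

lemma getD_set_ne (l : List Int) (a j : Nat) (v : Int) (h : a ≠ j) :
    (l.set a v).getD j 0 = l.getD j 0 := by
  simp [List.getD_eq_getElem?_getD, List.getElem?_set_ne, h]

lemma popLoop_spec (P : List Int) (i : Nat) (hi : i < P.length)
    (stack : List (Nat × Int)) (ans : List Int)
    (hlen : ans.length = P.length)
    (hent : ∀ e ∈ stack, e.1 < i ∧ e.2 = P.getD e.1 0)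
    (hmono : stack.Pairwise (fun a b => b.1 < a.1 ∧ b.2 ≤ a.2))
    (hnos : ∀ e ∈ stack, ∀ k, e.1 < k → k < i → P.getD e.1 0 ≤ P.getD k 0) :
    let r := popLoop (P.getD i 0) i stack ans
    r.2.length = P.length ∧
    (∀ e, e ∈ r.1 ↔ e ∈ stack ∧ e.2 ≤ P.getD i 0) ∧
    r.1.Pairwise (fun a b => b.1 < a.1 ∧ b.2 ≤ a.2) ∧
    (∀ j, j ∈ stack.map Prod.fst → j ∉ r.1.map Prod.fst →
        r.2.getD j 0 = countA (P.getD j 0) (P.drop (j + 1))) ∧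
    (∀ j, j ∉ stack.map Prod.fst → r.2.getD j 0 = ans.getD j 0) := by
  induction stack generalizing ans with
  | nil => simp [popLoop, hlen]
  | cons e rest ih =>
      obtain ⟨j, pj⟩ := e
      rw [List.pairwise_cons] at hmono
      have hjrest : j ∉ rest.map Prod.fst := by
        intro hmem
        obtain ⟨b, hb, hb1⟩ := List.mem_map.mp hmem
        exact absurd hb1 (Nat.ne_of_lt (hmono.1 b hb).1)
      by_cases hpop : pj > P.getD i 0
      · -- pop branch
        have hji : j < i := (hent (j, pj) (by simp)).1
        have hgj : pj = P.getD j 0 := (hent (j, pj) (by simp)).2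
        have hlen' : (ans.set j ((i : Int) - (j : Int))).length = P.length := by
          simpa using hlen
        have hent' : ∀ e ∈ rest, e.1 < i ∧ e.2 = P.getD e.1 0 :=
          fun e he => hent e (by simp [he])
        have hnos' : ∀ e ∈ rest, ∀ k, e.1 < k → k < i → P.getD e.1 0 ≤ P.getD k 0 :=
          fun e he => hnos e (by simp [he])
        have IH := ih (ans.set j ((i : Int) - (j : Int))) hlen' hent' hmono.2 hnos'
        obtain ⟨IH1, IH2, IH3, IH4, IH5⟩ := IH
        have hstep : popLoop (P.getD i 0) i ((j, pj) :: rest) ans =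
            popLoop (P.getD i 0) i rest (ans.set j ((i : Int) - (j : Int))) := by
          simp only [popLoop]; rw [if_pos hpop]
        rw [hstep]
        refine ⟨IH1, ?_, IH3, ?_, ?_⟩
        · intro e
          rw [IH2 e]
          constructor
          · rintro ⟨he, hle⟩; exact ⟨by simp [he], hle⟩
          · rintro ⟨he, hle⟩
            rcases List.mem_cons.mp he with h | h
            · rw [h] at hle; exact absurd hle (not_le.mpr hpop)
            · exact ⟨h, hle⟩
        · intro k hk hk'
          by_cases hkj : k = j
          · subst hkj
            have hknotr : k ∉ (popLoop (P.getD i 0) i rest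
                (ans.set k ((i : Int) - (k : Int)))).1.map Prod.fst := hk'
            have hcnt : countA (P.getD k 0) (P.drop (k + 1)) = (i : Int) - (k : Int) := by
              have hm : i - k - 1 < (P.drop (k + 1)).length := by
                rw [List.length_drop]; omega
              have hx : (P.drop (k + 1)).getD (i - k - 1) 0 < P.getD k 0 := by
                rw [getD_drop]
                have : k + 1 + (i - k - 1) = i := by omega
                rw [this, ← hgj]; omega
              have hbef : ∀ m, m < i - k - 1 → P.getD k 0 ≤ (P.drop (k + 1)).getD m 0 := by
                intro m hm'
                rw [getD_drop]
                exact hnos (k, pj) (by simp) (k + 1 + m) (by omega) (by omega)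
              rw [countA_found _ _ _ hm hx hbef]
              omega
            rw [hcnt, IH5 k hjrest, getD_set_self]
            rw [hlen]; omega
          · have hkrest : k ∈ rest.map Prod.fst := by
              rcases List.mem_map.mp hk with ⟨b, hb, hb1⟩
              rcases List.mem_cons.mp hb with h | h
              · exact absurd ((by rw [h] at hb1; exact hb1.symm) : k = j) hkj
              · exact List.mem_map.mpr ⟨b, h, hb1⟩
            exact IH4 k hkrest hk'
        · intro k hk
          have hkj : k ≠ j := by intro h; exact hk (by simp [h])
          have hkrest : k ∉ rest.map Prod.fst := by
            intro h; exact hk (by simp [h])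
          rw [IH5 k hkrest, getD_set_ne _ _ _ _ (Ne.symm hkj)]
      · -- stop branch
        have hstep : popLoop (P.getD i 0) i ((j, pj) :: rest) ans = ((j, pj) :: rest, ans) := by
          simp only [popLoop]; rw [if_neg hpop]
        rw [hstep]
        refine ⟨hlen, ?_, List.pairwise_cons.mpr hmono, ?_, fun _ _ => rfl⟩
        · intro e
          constructor
          · intro he
            refine ⟨he, ?_⟩
            rcases List.mem_cons.mp he with h | h
            · rw [h]; omega
            · have := (hmono.1 e h).2; omega
          · exact fun h => h.1
        · intro k hk hk'
          exact absurd hk hk'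

lemma mainB_inv (P : List Int) :
    ∀ (rest : List Int) (i : Nat) (stack : List (Nat × Int)) (ans : List Int),
      rest = P.drop i → StackInv P i stack ans →
      StackInv P P.length (mainB i stack ans rest).1 (mainB i stack ans rest).2 := by
  intro rest
  induction rest with
  | nil =>
      intro i stack ans hdrop inv
      have hge : P.length ≤ i := List.drop_eq_nil_iff.mp hdrop.symm
      have : i = P.length := le_antisymm inv.1 hge
      subst this
      exact inv
  | cons p rest' ih =>
      intro i stack ans hdrop inv
      obtain ⟨h1, h2, h3, h4, h5, h6⟩ := inv
      have hi : i < P.length := by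
        by_contra h
        rw [List.drop_eq_nil_of_le (by omega)] at hdrop
        simp at hdrop
      have hdrop' : P.drop i = P[i] :: P.drop (i + 1) := List.drop_eq_getElem_cons hi
      rw [hdrop'] at hdrop
      have hp : p = P.getD i 0 := by
        rw [List.getD_eq_getElem _ _ hi]; exact (List.cons.injEq _ _ _ _ ▸ hdrop).1
      have hrest' : rest' = P.drop (i + 1) := (List.cons.injEq _ _ _ _ ▸ hdrop).2
      subst hp
      have hnos : ∀ e ∈ stack, ∀ k, e.1 < k → k < i → P.getD e.1 0 ≤ P.getD k 0 := by
        intro e he k hk1 hk2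
        have hmem : e.1 ∈ stack.map Prod.fst := List.mem_map.mpr ⟨e, he, rfl⟩
        exact ((h5 e.1 (h3 e he).1).mp hmem) k hk1 hk2
      obtain ⟨R1, R2, R3, R4, R5⟩ := popLoop_spec P i hi stack ans h2 h3 h4 hnos
      have hmainstep : mainB i stack ans (P.getD i 0 :: rest') =
          mainB (i + 1) ((i, P.getD i 0) :: (popLoop (P.getD i 0) i stack ans).1)
            (popLoop (P.getD i 0) i stack ans).2 rest' := rfl
      rw [hmainstep]
      apply ih (i + 1) _ _ hrest'
      set r := popLoop (P.getD i 0) i stack ans with hr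
      have hidx : ∀ j, j ∈ r.1.map Prod.fst ↔
          j ∈ stack.map Prod.fst ∧ P.getD j 0 ≤ P.getD i 0 := by
        intro j
        constructor
        · intro hm
          obtain ⟨e, he, hej⟩ := List.mem_map.mp hm
          have he' := (R2 e).mp he
          have := (h3 e he'.1).2
          exact ⟨List.mem_map.mpr ⟨e, he'.1, hej⟩, by rw [← hej, ← this]; exact he'.2⟩
        · rintro ⟨hm, hle⟩
          obtain ⟨e, he, hej⟩ := List.mem_map.mp hm
          refine List.mem_map.mpr ⟨e, (R2 e).mpr ⟨he, ?_⟩, hej⟩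
          rw [(h3 e he).2, hej]; exact hle
      refine ⟨by omega, R1, ?_, ?_, ?_, ?_⟩
      · intro e he
        rcases List.mem_cons.mp he with h | h
        · rw [h]; exact ⟨by omega, rfl⟩
        · have := h3 e ((R2 e).mp h).1
          exact ⟨by omega, this.2⟩
      · refine List.pairwise_cons.mpr ⟨?_, R3⟩
        intro b hb
        have hb' := (R2 b).mp hb
        exact ⟨(h3 b hb'.1).1, hb'.2⟩
      · intro j hj
        by_cases hji : j = i
        · subst hji
          simp only [List.map_cons, List.mem_cons]
          constructor
          · intro _ k hk1 hk2; omega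
          · intro _; simp
        · have hjlt : j < i := by omega
          simp only [List.map_cons, List.mem_cons]
          constructor
          · rintro (h | h)
            · exact absurd h hji
            · intro k hk1 hk2
              have := (hidx j).mp h
              by_cases hki : k = i
              · subst hki; exact this.2
              · exact ((h5 j hjlt).mp this.1) k hk1 (by omega)
          · intro hall
            refine Or.inr ((hidx j).mpr ⟨(h5 j hjlt).mpr
              (fun k hk1 hk2 => hall k hk1 (by omega)), hall i hjlt (by omega)⟩)
      · intro j hj hjn
        simp only [List.map_cons, List.mem_cons, not_or] at hjn
        have hjlt : j < i := by omega
        by_cases hjs : j ∈ stack.map Prod.fst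
        · exact R4 j hjs hjn.2
        · rw [R5 j hjs]; exact h6 j hjlt hjs

lemma foldl_set_getD (n : Nat) :
    ∀ (stack : List (Nat × Int)) (ans : List Int), ans.length = n →
      (∀ e ∈ stack, e.1 < n) → (stack.map Prod.fst).Nodup →
      ∀ j,
        (stack.foldl (fun a e => a.set e.1 ((n : Int) - 1 - (e.1 : Int))) ans).getD j 0 =
          if j ∈ stack.map Prod.fst then (n : Int) - 1 - (j : Int) else ans.getD j 0 := by
  intro stack
  induction stack with
  | nil => intro ans _ _ _ j; simp
  | cons e es ih =>
      intro ans hlen hb hnd j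
      simp only [List.map_cons, List.nodup_cons] at hnd
      have hb' : ∀ f ∈ es, f.1 < n := fun f hf => hb f (by simp [hf])
      have hlen' : (ans.set e.1 ((n : Int) - 1 - (e.1 : Int))).length = n := by
        simpa using hlen
      have hih := ih (ans.set e.1 ((n : Int) - 1 - (e.1 : Int))) hlen' hb' hnd.2 j
      simp only [List.foldl_cons, List.map_cons, List.mem_cons]
      rw [hih]
      by_cases hj : j ∈ es.map Prod.fst
      · simp [hj]
      · by_cases hje : j = e.1
        · subst hje
          have hlt : e.1 < ans.length := by rw [hlen]; exact hb e (by simp)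
          rw [if_neg hj, getD_set_self _ _ _ hlt, if_pos (Or.inl rfl)]
        · rw [if_neg hj, getD_set_ne _ _ _ _ (Ne.symm hje), if_neg (by simp [hje, hj])]

lemma foldl_set_length (stack : List (Nat × Int)) (ans : List Int) (v : Nat × Int → Int) :
    (stack.foldl (fun a e => a.set e.1 (v e)) ans).length = ans.length := by
  induction stack generalizing ans with
  | nil => rfl
  | cons e es ih => simp [List.foldl_cons, ih]

theorem solution_alt_eq (P : List Int) : solution_alt P = solution P := by
  have inv0 : StackInv P 0 [] (List.replicate P.length 0) := by
    refine ⟨Nat.zero_le _, List.length_replicate, by simp, List.Pairwise.nil, ?_, ?_⟩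
    · intro j hj; omega
    · intro j hj; omega
  have inv := mainB_inv P P 0 [] (List.replicate P.length 0) (by simp) inv0
  obtain ⟨_, h2, h3, h4, h5, h6⟩ := inv
  set st := mainB 0 [] (List.replicate P.length 0) P with hst
  have hnodup : (st.1.map Prod.fst).Nodup := by
    show (st.1.map Prod.fst).Pairwise (· ≠ ·)
    exact List.pairwise_map.mpr (h4.imp (fun h => by omega))
  have hbnd : ∀ e ∈ st.1, e.1 < P.length := fun e he => (h3 e he).1
  have hget := foldl_set_getD P.length st.1 st.2 h2 hbnd hnodup
  have hchr : ∀ j, j < P.length → j ∈ st.1.map Prod.fst →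
      countA (P.getD j 0) (P.drop (j + 1)) = (P.length : Int) - 1 - (j : Int) := by
    intro j hj hmem
    have hall := (h5 j hj).mp hmem
    have : ∀ y ∈ P.drop (j + 1), P.getD j 0 ≤ y := by
      intro y hy
      obtain ⟨m, hm, hy⟩ := List.mem_iff_getElem.mp hy
      rw [List.getElem_drop] at hy
      subst hy
      rw [← List.getD_eq_getElem _ (0:Int) (by rw [List.length_drop] at hm; omega)]
      exact hall (j + 1 + m) (by omega) (by rw [List.length_drop] at hm; omega)
    rw [countA_of_forall_le _ _ this, List.length_drop]
    push_cast [Nat.cast_sub (by omega : j + 1 ≤ P.length)]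
    ring
  have halt : solution_alt P =
      st.1.foldl (fun a e => a.set e.1 ((P.length : Int) - 1 - (e.1 : Int))) st.2 := rfl
  apply List.ext_getElem
  · rw [halt, foldl_set_length, h2, solution_length]
  · intro j hj1 hj2
    rw [solution_length] at hj2
    rw [← List.getD_eq_getElem _ (0:Int) hj1, ← List.getD_eq_getElem _ (0:Int) (by omega),
      solution_getD P j hj2, halt, hget j]
    by_cases hmem : j ∈ st.1.map Prod.fst
    · rw [if_pos hmem, hchr j hj2 hmem]
    · rw [if_neg hmem, h6 j hj2 hmem]

-- ===== VERDICT (by name: the statement is the Claim_ definition above) =====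
theorem solution_spec : Claim_equal_solution := by
  intro prices _
  unfold Spec_solution
  exact (solution_alt_eq prices).symm
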